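-- pv_equiv track=rewrite | github.com/jotaalvim/PL2023 | TPC1/solve.py | exercicio2
-- ===== SOURCE A (Python) =====
-- def exercicio2(todos:list) -> (list, list):
--     aux = {}
--     for dic in todos:
--         idade = dic["idade"]
--         doenca = dic["temDoenca"]
--         if doenca:
--             i = idade // 5
--             aux[i] = aux[i] + 1 if i in aux else 1
--
--     names = []
--     mk = max(aux.keys())
--     values = [ aux.get(n,0)   for n in range(mk) ]
--     a = 0
--     while a < mk * 5:
--         names.append( str([a,a+4]) )
--         a+= 5
--
--     return names, values
-- ===== SOURCE B (Python) =====
-- def exercicio2(todos: list) -> (list, list):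
--     rest = sorted(d["idade"] // 5 for d in todos if d["temDoenca"])
--     mk = rest[-1]
--     names, values = [], []
--     for n in range(mk):
--         names.append(str([5 * n, 5 * n + 4]))
--         c = 0
--         while rest and rest[0] <= n:
--             if rest[0] == n:
--                 c += 1
--             rest = rest[1:]
--         values.append(c)
--     return names, values
-- ===== Notes on version B (the rewrite author's own statement) =====
-- stated objective: alternative
-- what changed: B sorts the diseased bucket indices once and fills the per-bucket counts with a single merge-style scan that consumes the sorted list (taking mk from its last element), instead of A's sparse dict histogram, max over keys and separate while-loop for the names; Pre_ excludes only inputs on which A raises (a record missing 'idade'/'temDoenca', or no diseased person).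
import Mathlib
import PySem

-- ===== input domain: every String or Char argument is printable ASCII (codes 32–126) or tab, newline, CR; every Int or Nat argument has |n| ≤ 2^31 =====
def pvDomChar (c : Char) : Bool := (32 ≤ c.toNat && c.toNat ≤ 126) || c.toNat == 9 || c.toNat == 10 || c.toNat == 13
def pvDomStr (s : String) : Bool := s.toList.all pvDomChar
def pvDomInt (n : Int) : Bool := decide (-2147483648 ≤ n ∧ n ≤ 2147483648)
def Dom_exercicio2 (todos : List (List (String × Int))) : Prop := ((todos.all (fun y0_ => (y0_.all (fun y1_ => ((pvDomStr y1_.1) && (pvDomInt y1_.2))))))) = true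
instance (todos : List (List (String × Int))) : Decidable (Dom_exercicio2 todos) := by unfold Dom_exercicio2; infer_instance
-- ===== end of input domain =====

-- B sorts the diseased bucket indices once and fills the counts with one merge-style scan
-- that consumes the sorted list, instead of A's sparse dict histogram (objective: alternative).

-- str([a, a+4]) — shared helper: both Pythons contain this exact expression
def strInterval (a : Int) : String :=
  "[" ++ PySem.Int.toStr a ++ ", " ++ PySem.Int.toStr (a + 4) ++ "]"

-- ===== PORT A =====
-- the 'while a < mk*5: names.append(str([a,a+4])); a += 5' loop, with fuel = its iteration count
def namesLoopA (bound : Int) (a : Int) (fuel : Nat) (acc : List String) : List String :=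
  match fuel with
  | 0 => acc
  | f + 1 => if a < bound then namesLoopA bound (a + 5) f (acc ++ [strInterval a]) else acc

def exercicio2 (todos : List (List (String × Int))) : List String × List Int :=
  let aux : PySem.Dict Int Int := todos.foldl (fun aux dic =>
      let dd := PySem.Dict.ofList dic
      let idade := dd.getD "idade" 0
      let doenca := dd.getD "temDoenca" 0
      if doenca ≠ 0 then
        let i := PySem.Int.floordiv idade 5
        aux.insert i (if aux.contains i then aux.getD i 0 + 1 else 1)
      else aux) PySem.Dict.empty
  -- max(aux.keys()) raises ValueError on an empty dict; Pre_ excludes that, the port defaults to 0 there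
  let mk : Int := (PySem.List.max? aux.keys (fun x => x)).getD 0
  let values : List Int := (PySem.List.pyRange 0 mk 1).map (fun n => aux.getD n 0)
  let names : List String := namesLoopA (mk * 5) 0 mk.toNat []
  (names, values)

-- ===== PORT B =====
-- the inner 'while rest and rest[0] <= n: if rest[0] == n: c += 1; rest = rest[1:]' loop
def consumeB (n : Int) (c : Int) : List Int → Int × List Int
  | [] => (c, [])
  | x :: t => if x ≤ n then consumeB n (if x = n then c + 1 else c) t else (c, x :: t)

-- one iteration of B's 'for n in range(mk)' loop body over the state (names, values, rest)
def stepB (st : List String × List Int × List Int) (n : Int) : List String × List Int × List Int :=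
  let (names, values, rest) := st
  let names := names ++ [strInterval (5 * n)]
  let (c, rest) := consumeB n 0 rest
  (names, values ++ [c], rest)

def exercicio2_alt (todos : List (List (String × Int))) : List String × List Int :=
  let rest0 : List Int := PySem.List.sorted
    ((todos.filter (fun dic => (PySem.Dict.ofList dic).getD "temDoenca" 0 ≠ 0)).map
      (fun dic => PySem.Int.floordiv ((PySem.Dict.ofList dic).getD "idade" 0) 5))
    (fun x => x) false
  -- rest[-1] raises IndexError on an empty list; Pre_ excludes that, the port defaults to 0 there
  let mk : Int := (PySem.List.pyGet? rest0 (-1)).getD 0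
  let st := (PySem.List.pyRange 0 mk 1).foldl stepB ([], [], rest0)
  (st.1, st.2.1)

-- ===== PRECONDITION & SPEC =====
-- Pre_ excludes exactly the inputs on which the Python A raises: a person record missing the
-- "idade" or "temDoenca" key (KeyError), and inputs with no diseased person, where
-- max() of an empty sequence raises ValueError (B's rest[-1] raises IndexError there).
def Pre_exercicio2 (todos : List (List (String × Int))) : Prop :=
  (∀ dic ∈ todos, (PySem.Dict.ofList dic).contains "idade" = true ∧
                  (PySem.Dict.ofList dic).contains "temDoenca" = true) ∧
  (∃ dic ∈ todos, (PySem.Dict.ofList dic).getD "temDoenca" 0 ≠ 0)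
instance (todos : List (List (String × Int))) : Decidable (Pre_exercicio2 todos) := by
  unfold Pre_exercicio2; infer_instance

def pvWitness_exercicio2 : (List (List (String × Int))) := [[("idade", 7), ("temDoenca", 1)]]

def Spec_exercicio2 (todos : List (List (String × Int))) (out : List String × List Int) : Prop := out = exercicio2_alt todos
instance (todos : List (List (String × Int))) (out : List String × List Int) : Decidable (Spec_exercicio2 todos out) := by unfold Spec_exercicio2; infer_instance

-- ===== CLAIM (what is proved, stated in full; the proofs are below) =====
def Claim_equal_exercicio2 : Prop := ∀ (todos : List (List (String × Int))), Dom_exercicio2 todos → Pre_exercicio2 todos → Spec_exercicio2 todos (exercicio2 todos)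

-- ===== LEMMAS AND PROOFS =====

-- the list of diseased bucket indices, used only by the proofs
def pvBuckets (todos : List (List (String × Int))) : List Int :=
  (todos.filter (fun dic => (PySem.Dict.ofList dic).getD "temDoenca" 0 ≠ 0)).map
    (fun dic => PySem.Int.floordiv ((PySem.Dict.ofList dic).getD "idade" 0) 5)

lemma insert_if_eq (d : PySem.Dict Int Int) (x : Int) :
    d.insert x (if d.contains x then d.getD x 0 + 1 else 1) = d.insert x (d.getD x 0 + 1) := by
  by_cases h : d.contains x
  · simp [h]
  · simp only [Bool.not_eq_true] at h
    rw [PySem.Dict.getD_of_not_contains (h := h), h]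
    simp

-- A's histogram loop is the Counter loop over the bucket list
lemma foldl_hist (todos : List (List (String × Int))) : ∀ d : PySem.Dict Int Int,
    todos.foldl (fun aux dic =>
      let dd := PySem.Dict.ofList dic
      let idade := dd.getD "idade" 0
      let doenca := dd.getD "temDoenca" 0
      if doenca ≠ 0 then
        let i := PySem.Int.floordiv idade 5
        aux.insert i (if aux.contains i then aux.getD i 0 + 1 else 1)
      else aux) d
    = (pvBuckets todos).foldl (fun d x => d.insert x (d.getD x 0 + 1)) d := by
  induction todos with
  | nil => intro d; simp [pvBuckets]
  | cons dic rest ih =>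
    intro d
    rw [List.foldl_cons]
    by_cases h : (PySem.Dict.ofList dic).getD "temDoenca" 0 ≠ 0
    · have hb : pvBuckets (dic :: rest)
          = PySem.Int.floordiv ((PySem.Dict.ofList dic).getD "idade" 0) 5 :: pvBuckets rest := by
        simp [pvBuckets, h]
      rw [hb, List.foldl_cons, if_pos h, ih, insert_if_eq]
    · have hb : pvBuckets (dic :: rest) = pvBuckets rest := by
        simp [pvBuckets, h]
      rw [hb, if_neg h, ih]

-- max over a deduplicated list is max over the list
lemma max_ofList_eq (xs : List Int) :
    (PySem.List.max? (PySem.Set.ofList xs) (fun x => x)).getD 0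
      = (PySem.List.max? xs (fun x => x)).getD 0 := by
  rcases hx : PySem.List.max? xs (fun x => x) with _ | m2
  · rw [PySem.List.max?_eq_none_iff] at hx
    subst hx
    simp [PySem.Set.ofList, PySem.List.max?]
  · have hxs : xs ≠ [] := by
      intro h; subst h; simp [PySem.List.max?] at hx
    have hne : PySem.Set.ofList xs ≠ [] := by
      intro h
      rcases xs with _ | ⟨x, t⟩
      · exact hxs rfl
      · have : x ∈ PySem.Set.ofList (x :: t) := (PySem.Set.mem_ofList _ _).2 (by simp)
        rw [h] at this; simp at this
    rcases ho : PySem.List.max? (PySem.Set.ofList xs) (fun x => x) with _ | m1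
    · rw [PySem.List.max?_eq_none_iff] at ho; exact absurd ho hne
    · have h1 : m1 ∈ xs := (PySem.Set.mem_ofList _ _).1 (PySem.List.max?_mem ho)
      have h2 : m2 ∈ PySem.Set.ofList xs := (PySem.Set.mem_ofList _ _).2 (PySem.List.max?_mem hx)
      have le1 : m1 ≤ m2 := PySem.List.max?_isMax hx m1 h1
      have le2 : m2 ≤ m1 := PySem.List.max?_isMax ho m2 h2
      simp [le_antisymm le1 le2]

-- the last element of a sorted nonempty list is the maximum of the unsorted list
lemma last_sorted_eq_max (l : List Int) (hl : l ≠ []) :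
    (PySem.List.pyGet? (PySem.List.sorted l (fun x => x) false) (-1)).getD 0
      = (PySem.List.max? l (fun x => x)).getD 0 := by
  set s := PySem.List.sorted l (fun x => x) false with hs
  have hsne : s ≠ [] := by
    intro h; exact hl ((PySem.List.sorted_eq_nil_iff l (fun x => x) false).1 h)
  rcases hx : PySem.List.max? l (fun x => x) with _ | m
  · rw [PySem.List.max?_eq_none_iff] at hx; exact absurd hx hl
  have hperm : s.Perm l := PySem.List.sorted_perm l (fun x => x) false
  have hslen : 0 < s.length := List.length_pos_iff.2 hsne
  have hlast : s.getLast? = some s[s.length - 1] := by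
    rw [List.getLast?_eq_getElem?, List.getElem?_eq_getElem (by omega)]
  rw [PySem.List.pyGet?_neg_one, hlast]
  have hmem : s[s.length - 1] ∈ l := hperm.mem_iff.1 (List.getElem_mem _)
  have h1 : s[s.length - 1] ≤ m := PySem.List.max?_isMax hx _ hmem
  have hm_s : m ∈ s := hperm.mem_iff.2 (PySem.List.max?_mem hx)
  obtain ⟨p, hp, hpe⟩ := List.mem_iff_getElem.1 hm_s
  have hlen2 : (PySem.List.sorted l (fun x => x) false).length = s.length := by rw [← hs]
  have h2 : m ≤ s[s.length - 1] := by
    rw [← hpe]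
    exact PySem.List.sorted_id_getElem_mono (xs := l) (by omega) (by rw [hlen2]; omega)
  simp [le_antisymm h1 h2]

-- B's inner while-loop on a sorted list: counts the occurrences of n, drops everything ≤ n
lemma consumeB_spec (n : Int) : ∀ (r : List Int), r.Pairwise (· ≤ ·) → ∀ c : Int,
    consumeB n c r = (c + (r.count n : Int), r.dropWhile (fun x => decide (x ≤ n))) := by
  intro r
  induction r with
  | nil => intro _ c; simp [consumeB]
  | cons x t ih =>
    intro hp c
    rw [consumeB]
    by_cases hx : x ≤ n
    · rw [if_pos hx, ih (List.Pairwise.of_cons hp)]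
      rw [List.dropWhile_cons_of_pos (by simpa using hx)]
      by_cases he : x = n
      · simp [he]; ring
      · simp [he]
    · rw [if_neg hx]
      have hcnt : (x :: t).count n = 0 := by
        rw [List.count_eq_zero]
        intro hmem
        rcases List.mem_cons.1 hmem with h | h
        · omega
        · have := (List.pairwise_cons.1 hp).1 n h; omega
      rw [List.dropWhile_cons_of_neg (by simpa using hx), hcnt]
      simp
lemma count_dropWhile_of_lt (r : List Int) (n k : Int) (h : n < k) :
    (r.dropWhile (fun x => decide (x ≤ n))).count k = r.count k := by
  conv_rhs => rw [← List.takeWhile_append_dropWhile (p := fun x => decide (x ≤ n)) (l := r)]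
  rw [List.count_append]
  have : (r.takeWhile (fun x => decide (x ≤ n))).count k = 0 := by
    rw [List.count_eq_zero]
    intro hmem
    have := List.mem_takeWhile_imp hmem
    simp at this; omega
  omega

-- B's outer for-loop: appends one name and one count per bucket index
lemma loopB (m : Nat) : ∀ (j : Nat) (ns : List String) (vs : List Int) (r : List Int),
    r.Pairwise (· ≤ ·) →
    ∃ r', ((List.range m).map (fun k : Nat => ((j + k : Nat) : Int))).foldl stepB (ns, vs, r)
      = (ns ++ (List.range m).map (fun k : Nat => strInterval (5 * ((j + k : Nat) : Int))),
         vs ++ (List.range m).map (fun k : Nat => (r.count ((j + k : Nat) : Int) : Int)), r') := by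
  induction m with
  | zero => intro j ns vs r _; exact ⟨r, by simp⟩
  | succ m ih =>
    intro j ns vs r hp
    rw [List.range_succ_eq_map, List.map_cons, List.foldl_cons]
    have hstep : stepB (ns, vs, r) ((j + 0 : Nat) : Int)
        = (ns ++ [strInterval (5 * ((j : Nat) : Int))],
           vs ++ [(r.count ((j : Nat) : Int) : Int)],
           r.dropWhile (fun x => decide (x ≤ ((j : Nat) : Int)))) := by
      simp only [Nat.add_zero, stepB]
      rw [consumeB_spec _ r hp 0]
      simp
    rw [hstep]
    have hp' : (r.dropWhile (fun x => decide (x ≤ ((j : Nat) : Int)))).Pairwise (· ≤ ·) :=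
      hp.sublist (List.dropWhile_sublist _)
    have hmap1 : (List.range m).map ((fun k : Nat => ((j + k : Nat) : Int)) ∘ Nat.succ)
        = (List.range m).map (fun k : Nat => (((j + 1) + k : Nat) : Int)) := by
      apply List.map_congr_left; intro k _; simp [Function.comp]; ring
    rw [List.map_map, hmap1]
    obtain ⟨r', hr'⟩ := ih (j + 1) (ns ++ [strInterval (5 * ((j : Nat) : Int))])
      (vs ++ [(r.count ((j : Nat) : Int) : Int)])
      (r.dropWhile (fun x => decide (x ≤ ((j : Nat) : Int)))) hp'
    refine ⟨r', ?_⟩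
    rw [hr']
    have hcnt : ∀ k : Nat,
        ((r.dropWhile (fun x => decide (x ≤ ((j : Nat) : Int)))).count (((j + 1) + k : Nat) : Int) : Int)
          = (r.count (((j + 1) + k : Nat) : Int) : Int) := by
      intro k
      rw [count_dropWhile_of_lt r _ _ (by push_cast; omega)]
    refine Prod.ext ?_ (Prod.ext ?_ rfl)
    · show (ns ++ [strInterval (5 * ((j : Nat) : Int))]) ++ _ = ns ++ _
      rw [List.append_assoc, List.map_cons, List.map_map, List.singleton_append]
      have hh : strInterval (5 * ((j + 0 : Nat) : Int)) = strInterval (5 * ((j : Nat) : Int)) := by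
        norm_num
      have ht : (List.range m).map ((fun k : Nat => strInterval (5 * ((j + k : Nat) : Int))) ∘ Nat.succ)
          = (List.range m).map (fun k : Nat => strInterval (5 * ((j + 1 + k : Nat) : Int))) := by
        apply List.map_congr_left; intro k _
        simp only [Function.comp]
        congr 1
        push_cast
        ring
      rw [hh, ht]
    · show (vs ++ [(r.count ((j : Nat) : Int) : Int)]) ++ _ = vs ++ _
      rw [List.append_assoc, List.map_cons, List.map_map, List.singleton_append,
        List.map_congr_left (fun k _ => hcnt k)]
      have hh : ((r.count ((j + 0 : Nat) : Int) : Int)) = ((r.count ((j : Nat) : Int) : Int)) := by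
        norm_num
      have ht : (List.range m).map ((fun k : Nat => ((r.count ((j + k : Nat) : Int) : Int))) ∘ Nat.succ)
          = (List.range m).map (fun k : Nat => ((r.count ((j + 1 + k : Nat) : Int) : Int))) := by
        apply List.map_congr_left; intro k _
        simp only [Function.comp]
        congr 2
        omega
      rw [hh, ht]

-- A's names loop is a map over the multiples of 5
lemma namesA (f : Nat) : ∀ (m : Int) (j : Nat) (acc : List String), (j : Int) + (f : Int) = m →
    namesLoopA (m * 5) (5 * (j : Int)) f acc
      = acc ++ (List.range f).map (fun k : Nat => strInterval (5 * ((j : Int) + (k : Int)))) := by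
  induction f with
  | zero => intro m j acc hj; simp [namesLoopA]
  | succ f ih =>
    intro m j acc hj
    rw [namesLoopA, if_pos (by omega : 5 * (j : Int) < m * 5)]
    have h5 : (5 : Int) * (j : Int) + 5 = 5 * ((j + 1 : Nat) : Int) := by push_cast; ring
    rw [h5, ih m (j + 1) _ (by push_cast; push_cast at hj; omega)]
    rw [List.range_succ_eq_map, List.map_cons, List.map_map]
    have hf : (fun k : Nat => strInterval (5 * (((j + 1 : Nat) : Int) + (k : Int))))
        = (fun k : Nat => strInterval (5 * ((j : Int) + (k : Int)))) ∘ Nat.succ := by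
      funext k
      simp only [Function.comp]
      congr 1
      push_cast
      ring
    rw [hf]
    have h0 : strInterval (5 * ((j : Int) + ((0 : Nat) : Int))) = strInterval (5 * (j : Int)) := by
      norm_num
    rw [h0]
    simp [List.append_assoc]

theorem main_eq (todos : List (List (String × Int))) (hne : pvBuckets todos ≠ []) :
    exercicio2 todos = exercicio2_alt todos := by
  simp only [exercicio2, exercicio2_alt]
  rw [foldl_hist, PySem.Dict.foldl_insert_getD_add_one_eq_counter, PySem.Dict.keys_counter,
    max_ofList_eq]
  have hbuck : (todos.filter (fun dic => (PySem.Dict.ofList dic).getD "temDoenca" 0 ≠ 0)).map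
      (fun dic => PySem.Int.floordiv ((PySem.Dict.ofList dic).getD "idade" 0) 5) = pvBuckets todos := rfl
  rw [hbuck, last_sorted_eq_max _ hne]
  set mk : Int := (PySem.List.max? (pvBuckets todos) (fun x => x)).getD 0 with hmk
  set s : List Int := PySem.List.sorted (pvBuckets todos) (fun x => x) false with hs
  have hsp : s.Pairwise (· ≤ ·) := by
    have := PySem.List.sorted_pairwise (pvBuckets todos) (fun x => x)
    simpa using this
  have hperm : s.Perm (pvBuckets todos) := PySem.List.sorted_perm _ _ _
  have hrange : PySem.List.pyRange 0 mk 1 = (List.range mk.toNat).map (fun k : Nat => ((0 + k : Nat) : Int)) := by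
    rw [PySem.List.pyRange_one]
    simp only [sub_zero]
    apply List.map_congr_left
    intro k _
    simp
  obtain ⟨r', hr'⟩ := loopB mk.toNat 0 [] [] s hsp
  rw [hrange, hr']
  refine Prod.ext ?_ ?_
  · show namesLoopA (mk * 5) 0 mk.toNat [] = [] ++ _
    rw [List.nil_append]
    by_cases hm : 0 ≤ mk
    · have h0 : (0 : Int) = 5 * ((0 : Nat) : Int) := by norm_num
      rw [h0, namesA mk.toNat mk 0 [] (by omega)]
      simp only [List.nil_append]
      apply List.map_congr_left
      intro k _
      norm_num
    · have : mk.toNat = 0 := by omega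
      rw [this]
      simp [namesLoopA]
  · show (List.map (fun k : Nat => ((0 + k : Nat) : Int)) (List.range mk.toNat)).map
        (fun n => (PySem.Dict.counter (pvBuckets todos)).getD n 0) = [] ++ _
    rw [List.nil_append, List.map_map]
    apply List.map_congr_left
    intro k _
    simp only [Function.comp]
    rw [PySem.Dict.getD_counter]
    rw [hperm.count_eq]

-- ===== VERDICT (by name: the statement is the Claim_ definition above) =====
theorem exercicio2_spec : Claim_equal_exercicio2 := by
  intro todos _ hpre
  unfold Spec_exercicio2
  apply main_eq
  obtain ⟨-, dic, hmem, hd⟩ := hpre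
  intro h
  have : dic ∈ todos.filter (fun dic => (PySem.Dict.ofList dic).getD "temDoenca" 0 ≠ 0) := by
    simp [List.mem_filter, hmem, hd]
  have : PySem.Int.floordiv ((PySem.Dict.ofList dic).getD "idade" 0) 5 ∈ pvBuckets todos :=
    List.mem_map.2 ⟨dic, this, rfl⟩
  rw [h] at this
  simp at this
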